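-- pv_equiv track=rewrite | github.com/son-phi/tai_lieu_hoc | ki4/pythonprogram/codeptit.py | count_unique_digits
-- ===== SOURCE A (Python) =====
-- def count_unique_digits(input_string):
--     unique_digits_set = set()
--     count_of_digits = 0
--
--     for char in input_string:
--         if char.isdigit() and char not in unique_digits_set:
--             unique_digits_set.add(char)
--             count_of_digits += 1
--
--     return count_of_digits>1
-- ===== SOURCE B (Python) =====
-- def count_unique_digits(input_string):
--     first = None
--     for ch in input_string:
--         if ch.isdigit():
--             if first is None:
--                 first = ch
--             elif ch != first:
--                 return True
--     return False
-- ===== Notes on version B (the rewrite author's own statement) =====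
-- stated objective: simpler
-- what changed: Replaces the unique-digit set and counter with a single scalar holding the first digit seen, returning True early as soon as a different digit appears.
import Mathlib
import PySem

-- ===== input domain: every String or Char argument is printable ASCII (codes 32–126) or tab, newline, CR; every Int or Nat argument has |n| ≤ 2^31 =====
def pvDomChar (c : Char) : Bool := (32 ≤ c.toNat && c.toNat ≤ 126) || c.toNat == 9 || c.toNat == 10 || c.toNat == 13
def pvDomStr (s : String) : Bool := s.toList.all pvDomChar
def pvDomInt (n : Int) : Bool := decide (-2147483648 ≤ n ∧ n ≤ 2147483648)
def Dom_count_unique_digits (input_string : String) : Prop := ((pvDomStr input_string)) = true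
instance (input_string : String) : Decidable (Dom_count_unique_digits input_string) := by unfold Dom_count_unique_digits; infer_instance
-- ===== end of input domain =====

-- B keeps only the first digit seen (a scalar) and returns True early on a different digit,
-- instead of A's unique-digit set with a counter; objective: simpler.

-- ===== PORT A =====
def cudStep (p : PySem.Set Char × Int) (char : Char) : PySem.Set Char × Int :=
  if PySem.Chars.isdigit char && !(PySem.Set.contains p.1 char) then
    (PySem.Set.add p.1 char, p.2 + 1)
  else p

def count_unique_digits (input_string : String) : Bool :=
  decide ((input_string.toList.foldl cudStep (PySem.Set.empty, 0)).2 > 1)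

-- ===== PORT B =====
def cudGo : Option Char → List Char → Bool
  | _, [] => false
  | none, c :: cs => if PySem.Chars.isdigit c then cudGo (some c) cs else cudGo none cs
  | some d, c :: cs =>
      if PySem.Chars.isdigit c then
        if c ≠ d then true else cudGo (some d) cs
      else cudGo (some d) cs

def count_unique_digits_alt (input_string : String) : Bool :=
  cudGo none input_string.toList

-- ===== PRECONDITION & SPEC =====
def Spec_count_unique_digits (input_string : String) (out : Bool) : Prop := out = count_unique_digits_alt input_string
instance (input_string : String) (out : Bool) : Decidable (Spec_count_unique_digits input_string out) := by unfold Spec_count_unique_digits; infer_instance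

-- ===== CLAIM (what is proved, stated in full; the proofs are below) =====
def Claim_equal_count_unique_digits : Prop := ∀ (input_string : String), Dom_count_unique_digits input_string → Spec_count_unique_digits input_string (count_unique_digits input_string)

-- ===== LEMMAS AND PROOFS =====
theorem cud_mono : ∀ (cs : List Char) (s : PySem.Set Char) (c : Int),
    c ≤ (List.foldl cudStep (s, c) cs).2 := by
  intro cs
  induction cs with
  | nil => intro s c; simp
  | cons x xs ih =>
      intro s c
      simp only [List.foldl_cons, cudStep]
      split_ifs with h
      · exact le_trans (by omega) (ih _ (c + 1))
      · exact ih s c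

theorem cud_some : ∀ (cs : List Char) (d : Char),
    decide ((List.foldl cudStep ([d], 1) cs).2 > 1) = cudGo (some d) cs := by
  intro cs
  induction cs with
  | nil => intro d; simp [cudGo]
  | cons x xs ih =>
      intro d
      simp only [List.foldl_cons, cudGo]
      by_cases hd : PySem.Chars.isdigit x
      · by_cases hx : x = d
        · subst hx
          have : cudStep ([x], 1) x = ([x], 1) := by
            simp [cudStep, PySem.Set.contains]
          simp only [this, ih]
          simp [hd]
        · have hc : PySem.Set.contains [d] x = false := by
            simp [PySem.Set.contains, hx]
          have : cudStep ([d], 1) x = ([d, x], 2) := by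
            simp [cudStep, hd, PySem.Set.add, hx]
          simp only [this]
          have h2 : (2 : Int) ≤ (List.foldl cudStep ([d, x], 2) xs).2 := cud_mono xs _ 2
          simp [hd, hx]
          omega
      · have : cudStep ([d], 1) x = ([d], 1) := by simp [cudStep, hd]
        simp only [this, ih]
        simp [hd]

theorem cud_none : ∀ (cs : List Char),
    decide ((List.foldl cudStep ([], 0) cs).2 > 1) = cudGo none cs := by
  intro cs
  induction cs with
  | nil => simp [cudGo]
  | cons x xs ih =>
      simp only [List.foldl_cons, cudGo]
      by_cases hd : PySem.Chars.isdigit x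
      · have : cudStep ([], 0) x = ([x], 1) := by
          simp [cudStep, hd, PySem.Set.contains, PySem.Set.add]
        simp only [this]
        simp [hd, cud_some]
      · have : cudStep ([], 0) x = ([], 0) := by simp [cudStep, hd]
        simp only [this, ih]
        simp [hd]

-- ===== VERDICT (by name: the statement is the Claim_ definition above) =====
theorem count_unique_digits_spec : Claim_equal_count_unique_digits := by
  intro s _
  unfold Spec_count_unique_digits count_unique_digits count_unique_digits_alt PySem.Set.empty
  exact cud_none s.toList
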